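-- pv_equiv track=rewrite | github.com/tokland/tokland | lavanguardia/chess.py | get_san_rank
-- ===== SOURCE A (Python) =====
-- import operator
-- import itertools
--
-- def get_san_rank(rank):
--     """Return SAN notation of rank."""
--     if not rank:
-- 	      return ""
--     nblank = len(list(itertools.takewhile(operator.not_, rank)))
--     if nblank:
--         return str(nblank) + get_san_rank(rank[nblank:])
--     else:
--         return rank[0] + get_san_rank(rank[1:])
-- ===== SOURCE B (Python) =====
-- def get_san_rank(rank):
--     """Return SAN notation of rank."""
--     out = []
--     nblank = 0
--     for sq in rank:
--         if sq:
--             if nblank: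
--                 out.append(str(nblank))
--                 nblank = 0
--             out.append(sq)
--         else:
--             nblank += 1
--     if nblank:
--         out.append(str(nblank))
--     return ''.join(out)
-- ===== Notes on version B (the rewrite author's own statement) =====
-- stated objective: faster
-- what changed: Replaced A's recursion over progressively shorter list slices (with a takewhile rescan per call) by a single forward pass keeping a pending-blank counter and a list of output pieces joined once at the end.
import Mathlib
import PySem

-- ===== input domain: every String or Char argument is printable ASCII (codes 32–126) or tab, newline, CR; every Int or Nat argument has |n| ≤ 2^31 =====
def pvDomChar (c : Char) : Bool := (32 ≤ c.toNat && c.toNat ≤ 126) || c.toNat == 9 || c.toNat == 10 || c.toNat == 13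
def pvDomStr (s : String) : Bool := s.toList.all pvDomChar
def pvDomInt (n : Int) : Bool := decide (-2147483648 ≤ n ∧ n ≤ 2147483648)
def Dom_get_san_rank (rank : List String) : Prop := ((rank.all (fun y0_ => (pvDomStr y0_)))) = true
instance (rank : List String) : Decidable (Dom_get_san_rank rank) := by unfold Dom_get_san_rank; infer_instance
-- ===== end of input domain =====

-- B replaces A's recursion over progressively shorter list slices by a single forward
-- accumulator pass (pending-blank counter + output pieces joined once at the end); objective: faster (single pass, no repeated slicing).

-- ===== PORT A =====
-- literal transliteration of A: recursion on the rank, takewhile of falsy (empty) strings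
def get_san_rank (rank : List String) : String :=
  if rank.isEmpty then ""
  else
    let nblank := (rank.takeWhile (fun s => s == "")).length
    if nblank ≠ 0 then
      PySem.Int.toStr (nblank : Int) ++ get_san_rank (rank.drop nblank)
    else
      rank.headD "" ++ get_san_rank (rank.drop 1)
termination_by rank.length
decreasing_by
  · rename_i h _
    have hlen : rank.length ≠ 0 := by
      intro h0; exact h (by simpa [List.isEmpty_iff_length_eq_zero] using h0)
    simp only [List.length_drop]; omega
  · rename_i h _
    have hlen : rank.length ≠ 0 := by
      intro h0; exact h (by simpa [List.isEmpty_iff_length_eq_zero] using h0)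
    simp only [List.length_drop]; omega

-- ===== PORT B =====
-- B's loop body: one step of the forward pass, state = (output pieces, pending blank count)
def sanStep (p : List String × Int) (sq : String) : List String × Int :=
  if sq ≠ "" then
    (if p.2 ≠ 0 then p.1 ++ [PySem.Int.toStr p.2, sq] else p.1 ++ [sq], 0)
  else
    (p.1, p.2 + 1)

def get_san_rank_alt (rank : List String) : String :=
  let st := rank.foldl sanStep ([], 0)
  let out := if st.2 ≠ 0 then st.1 ++ [PySem.Int.toStr st.2] else st.1
  PySem.Str.join "" out

-- ===== PRECONDITION & SPEC =====
def Spec_get_san_rank (rank : List String) (out : String) : Prop := out = get_san_rank_alt rank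
instance (rank : List String) (out : String) : Decidable (Spec_get_san_rank rank out) := by unfold Spec_get_san_rank; infer_instance

-- ===== CLAIM (what is proved, stated in full; the proofs are below) =====
def Claim_equal_get_san_rank : Prop := ∀ (rank : List String), Dom_get_san_rank rank → Spec_get_san_rank rank (get_san_rank rank)

-- ===== LEMMAS AND PROOFS =====

-- wrapping up B's final state (proof-side name for the tail of get_san_rank_alt)
def sanFinish (st : List String × Int) : String :=
  PySem.Str.join "" (if st.2 ≠ 0 then st.1 ++ [PySem.Int.toStr st.2] else st.1)

theorem chars_join_nil_eq_flatten (parts : List (List Char)) :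
    PySem.Chars.join [] parts = parts.flatten := by
  induction parts with
  | nil => rfl
  | cons a as ih =>
    cases as with
    | nil => simp [PySem.Chars.join, List.intercalate]
    | cons b bs =>
      simp only [PySem.Chars.join, List.intercalate] at ih ⊢
      rw [List.intersperse_cons₂]
      simpa using ih

theorem str_join_empty_snoc (out : List String) (x : String) :
    PySem.Str.join "" (out ++ [x]) = PySem.Str.join "" out ++ x := by
  simp [PySem.Str.join, chars_join_nil_eq_flatten, String.ofList_append]

-- A on a run of n blanks followed by a non-blank square
theorem getA_blank_run (n : Nat) (hn : n ≠ 0) (sq : String) (hsq : sq ≠ "") (rest : List String) :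
    get_san_rank (List.replicate n "" ++ sq :: rest)
      = PySem.Int.toStr (n : Int) ++ get_san_rank (sq :: rest) := by
  rw [get_san_rank]
  have hne : ¬ (List.replicate n "" ++ sq :: rest).isEmpty := by simp
  have htw : ∀ m : Nat, (List.replicate m "" ++ sq :: rest).takeWhile (fun s => s == "") = List.replicate m "" := by
    intro m
    induction m with
    | zero => simp [hsq]
    | succ k ihk => simpa [List.replicate_succ, List.takeWhile_cons] using ihk
  simp [hne, htw n, hn, List.drop_left']

-- A on a trailing run of n ≥ 1 blanks
theorem getA_blank_tail (n : Nat) (hn : n ≠ 0) :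
    get_san_rank (List.replicate n "") = PySem.Int.toStr (n : Int) := by
  rw [get_san_rank]
  have htw : (List.replicate n "").takeWhile (fun s => s == "") = List.replicate n "" := by
    simp
  rw [if_neg (by simpa using hn)]
  simp [htw, hn]
  rw [get_san_rank]
  simp

-- A on a non-blank head
theorem getA_piece (sq : String) (hsq : sq ≠ "") (rest : List String) :
    get_san_rank (sq :: rest) = sq ++ get_san_rank rest := by
  rw [get_san_rank]
  simp [hsq]

-- the invariant of B's pass: finishing the fold from state (out, n) yields the pieces so
-- far followed by A's answer on the pending blanks plus the remaining squares
theorem san_invariant (l : List String) (out : List String) (n : Nat) :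
    sanFinish (l.foldl sanStep (out, (n : Int)))
      = PySem.Str.join "" out ++ get_san_rank (List.replicate n "" ++ l) := by
  induction l generalizing out n with
  | nil =>
    by_cases hn : n = 0
    · subst hn
      simp [sanFinish, get_san_rank, String.append_empty]
    · have hni : ((n : Int) ≠ 0) := by exact_mod_cast hn
      simp only [List.foldl_nil, List.append_nil, sanFinish]
      rw [if_pos hni, str_join_empty_snoc, getA_blank_tail n hn]
  | cons sq rest ih =>
    by_cases hsq : sq = ""
    · subst hsq
      have hrepl : List.replicate n "" ++ "" :: rest = List.replicate (n + 1) "" ++ rest := by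
        simp [List.replicate_succ']
      have hstep : sanStep (out, (n : Int)) "" = (out, ((n + 1 : Nat) : Int)) := by
        simp [sanStep]
      rw [List.foldl_cons, hstep, ih out (n + 1), hrepl]
    · by_cases hn : n = 0
      · subst hn
        have hstep : sanStep (out, ((0 : Nat) : Int)) sq = (out ++ [sq], ((0 : Nat) : Int)) := by
          simp [sanStep, hsq]
        have h0 := ih (out ++ [sq]) 0
        simp only [List.replicate_zero, List.nil_append] at h0 ⊢
        rw [List.foldl_cons, hstep, h0, str_join_empty_snoc, getA_piece sq hsq rest,
            String.append_assoc]
      · have hni : ((n : Int) ≠ 0) := by exact_mod_cast hn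
        have hstep : sanStep (out, (n : Int)) sq
            = (out ++ [PySem.Int.toStr (n : Int), sq], ((0 : Nat) : Int)) := by
          simp [sanStep, hsq, hn]
        have h0 := ih (out ++ [PySem.Int.toStr (n : Int), sq]) 0
        simp only [List.replicate_zero, List.nil_append] at h0
        rw [List.foldl_cons, hstep, h0, getA_blank_run n hn sq hsq rest, getA_piece sq hsq rest]
        have hsplit : out ++ [PySem.Int.toStr (n : Int), sq]
            = (out ++ [PySem.Int.toStr (n : Int)]) ++ [sq] := by simp
        rw [hsplit, str_join_empty_snoc, str_join_empty_snoc, String.append_assoc,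
            String.append_assoc]

-- ===== VERDICT (by name: the statement is the Claim_ definition above) =====
theorem get_san_rank_spec : Claim_equal_get_san_rank := by
  intro rank _
  show get_san_rank rank = get_san_rank_alt rank
  have h := san_invariant rank [] 0
  simp only [List.replicate_zero, List.nil_append] at h
  have hj : PySem.Str.join "" ([] : List String) = "" := rfl
  rw [hj, String.empty_append] at h
  exact h.symm
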